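-- pv_equiv track=rewrite | github.com/Alessio-Renzetti/Es_python | criptografia.py | criptare
-- ===== SOURCE A (Python) =====
-- def criptare(frase,chiave,chiave2,cont):
--     if len(frase)!=0:
--         if cont%2==0:
--             return chr(ord(frase[0])+chiave)+criptare(frase[+1 :],chiave,chiave2,cont+1)
--         else:
--             return chr(ord(frase[0])+chiave2)+criptare(frase[+1 :],chiave,chiave2,cont+1)
--     else:
--         return ""
-- ===== SOURCE B (Python) =====
-- def criptare(frase, chiave, chiave2, cont):
--     out = []
--     for i, ch in enumerate(frase):
--         key = chiave if (cont + i) % 2 == 0 else chiave2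
--         out.append(chr(ord(ch) + key))
--     return "".join(out)
-- ===== Notes on version B (the rewrite author's own statement) =====
-- stated objective: faster
-- what changed: Replaced A's recursion with repeated string slicing and string concatenation by a single iterative pass over enumerate(frase) that picks the key by the parity of cont+index and joins an accumulator list at the end.
import Mathlib
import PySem

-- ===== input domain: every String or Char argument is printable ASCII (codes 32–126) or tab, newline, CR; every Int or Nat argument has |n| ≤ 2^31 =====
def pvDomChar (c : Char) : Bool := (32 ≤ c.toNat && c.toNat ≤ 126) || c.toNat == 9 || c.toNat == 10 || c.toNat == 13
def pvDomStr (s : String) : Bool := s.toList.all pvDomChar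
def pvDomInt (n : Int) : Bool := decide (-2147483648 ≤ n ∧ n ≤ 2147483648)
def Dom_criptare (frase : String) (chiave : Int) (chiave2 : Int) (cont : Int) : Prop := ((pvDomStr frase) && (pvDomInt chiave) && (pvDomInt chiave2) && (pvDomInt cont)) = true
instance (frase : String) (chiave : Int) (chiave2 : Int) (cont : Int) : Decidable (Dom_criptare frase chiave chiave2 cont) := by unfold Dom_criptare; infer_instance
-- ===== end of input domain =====

-- B replaces A's recursion-with-slicing by one iterative pass over enumerate with a joined accumulator (simpler, no repeated slicing).


-- chr(n) for a code that Pre_ guarantees is a valid non-surrogate code point (exact there)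
def pyChr (n : Int) : Char := Char.ofNat n.toNat

-- ===== PORT A =====
def criptareList (l : List Char) (chiave chiave2 cont : Int) : List Char :=
  match l with
  | [] => []
  | c :: rest =>
    if PySem.Int.mod cont 2 = 0 then
      pyChr ((c.toNat : Int) + chiave) :: criptareList rest chiave chiave2 (cont + 1)
    else
      pyChr ((c.toNat : Int) + chiave2) :: criptareList rest chiave chiave2 (cont + 1)

def criptare (frase : String) (chiave : Int) (chiave2 : Int) (cont : Int) : String :=
  String.mk (criptareList frase.toList chiave chiave2 cont)

-- ===== PORT B =====
def criptare_alt (frase : String) (chiave : Int) (chiave2 : Int) (cont : Int) : String :=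
  String.mk ((PySem.List.enumerate frase.toList 0).foldl
    (fun acc p =>
      acc ++ [pyChr ((p.2.toNat : Int) + (if PySem.Int.mod (cont + p.1) 2 = 0 then chiave else chiave2))])
    [])

-- ===== PRECONDITION & SPEC =====
-- Pre_ excludes inputs where some shifted code ord(c)+key is outside 0..0x10FFFF (Python's chr raises ValueError)
-- or lands in the surrogate range 0xD800..0xDFFF, where Python returns a lone-surrogate string that Lean's Char cannot represent.
def Pre_criptare (frase : String) (chiave : Int) (chiave2 : Int) (cont : Int) : Prop :=
  ∀ p ∈ PySem.List.enumerate frase.toList 0,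
    (0 ≤ (p.2.toNat : Int) + (if PySem.Int.mod (cont + p.1) 2 = 0 then chiave else chiave2)) ∧
    ((p.2.toNat : Int) + (if PySem.Int.mod (cont + p.1) 2 = 0 then chiave else chiave2) ≤ 1114111) ∧
    ¬ (55296 ≤ (p.2.toNat : Int) + (if PySem.Int.mod (cont + p.1) 2 = 0 then chiave else chiave2) ∧
       (p.2.toNat : Int) + (if PySem.Int.mod (cont + p.1) 2 = 0 then chiave else chiave2) ≤ 57343)
instance (frase : String) (chiave : Int) (chiave2 : Int) (cont : Int) : Decidable (Pre_criptare frase chiave chiave2 cont) := by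
  unfold Pre_criptare; infer_instance

def pvWitness_criptare : String × Int × Int × Int := ("ab", 1, -1, 0)

def Spec_criptare (frase : String) (chiave : Int) (chiave2 : Int) (cont : Int) (out : String) : Prop := out = criptare_alt frase chiave chiave2 cont
instance (frase : String) (chiave : Int) (chiave2 : Int) (cont : Int) (out : String) : Decidable (Spec_criptare frase chiave chiave2 cont out) := by unfold Spec_criptare; infer_instance

-- ===== CLAIM (what is proved, stated in full; the proofs are below) =====
def Claim_equal_criptare : Prop := ∀ (frase : String) (chiave : Int) (chiave2 : Int) (cont : Int), Dom_criptare frase chiave chiave2 cont → Pre_criptare frase chiave chiave2 cont → Spec_criptare frase chiave chiave2 cont (criptare frase chiave chiave2 cont)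

-- ===== LEMMAS AND PROOFS =====

theorem foldl_append_singleton {α β : Type} (f : α → β) :
    ∀ (l : List α) (a : List β), l.foldl (fun acc p => acc ++ [f p]) a = a ++ l.map f := by
  intro l
  induction l with
  | nil => intro a; simp
  | cons x xs ih => intro a; simp [List.foldl, ih]

theorem criptareList_eq_map (chiave chiave2 cont : Int) :
    ∀ (l : List Char) (n : Int),
      criptareList l chiave chiave2 (cont + n) =
        (PySem.List.enumerate l n).map
          (fun p => pyChr ((p.2.toNat : Int) + (if PySem.Int.mod (cont + p.1) 2 = 0 then chiave else chiave2))) := by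
  intro l
  induction l with
  | nil => intro n; simp [criptareList, PySem.List.enumerate_nil]
  | cons c rest ih =>
    intro n
    have h : cont + n + 1 = cont + (n + 1) := by ring
    simp only [criptareList, PySem.List.enumerate_cons, List.map_cons, h, ih (n + 1)]
    split <;> rfl

theorem criptare_spec : Claim_equal_criptare := by
  intro frase chiave chiave2 cont _ _
  unfold Spec_criptare criptare criptare_alt
  rw [foldl_append_singleton, List.nil_append]
  have := criptareList_eq_map chiave chiave2 cont frase.toList 0
  rw [add_zero] at this
  rw [this]
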